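-- pv_equiv track=rewrite | github.com/Yojitkataria/slideforge-ai | planner/slide_planner.py | _trim_to_max
-- ===== SOURCE A (Python) =====
-- from typing import Any
--
-- def _trim_to_max(slides: list[dict[str, Any]], max_slides: int) -> list[dict[str, Any]]:
--     if len(slides) <= max_slides:
--         return slides
--
--     # Keep first three high-priority slides and final conclusion.
--     head = slides[:3]
--     tail = [slides[-1]]
--     middle = slides[3:-1]
--
--     # Remove lower-priority slides first: chart/table, then extra content parts.
--     priority_order = {"content": 0, "table": 1, "chart": 2}
--     middle_sorted = sorted(
--         enumerate(middle),
--         key=lambda item: (priority_order.get(item[1].get("type", "content"), 3), item[0]),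
--     )
--
--     keep_count = max_slides - len(head) - len(tail)
--     kept_indices = sorted(index for index, _ in middle_sorted[:keep_count])
--     kept_middle = [middle[i] for i in kept_indices]
--
--     return head + kept_middle + tail
-- ===== SOURCE B (Python) =====
-- def _trim_to_max(slides, max_slides):
--     if len(slides) <= max_slides:
--         return slides
--
--     head = slides[:3]
--     tail = [slides[-1]]
--     middle = slides[3:-1]
--
--     # Bucket middle indices by the 4 priority levels instead of sorting.
--     priority_order = {"content": 0, "table": 1, "chart": 2}
--     buckets = ([], [], [], [])
--     for i, slide in enumerate(middle):
--         buckets[priority_order.get(slide.get("type", "content"), 3)].append(i)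
--     order = buckets[0] + buckets[1] + buckets[2] + buckets[3]
--
--     keep_count = max_slides - len(head) - len(tail)
--     kept = set(order[:keep_count])
--     return head + [s for i, s in enumerate(middle) if i in kept] + tail
-- ===== Notes on version B (the rewrite author's own statement) =====
-- stated objective: alternative
-- what changed: Replaces the stable sort of (priority, index) pairs and the second sort of kept indices by a single bucketing pass over the 4 priority levels plus a membership-filter pass over enumerate(middle) that rebuilds the kept middle in index order.
import Mathlib
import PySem

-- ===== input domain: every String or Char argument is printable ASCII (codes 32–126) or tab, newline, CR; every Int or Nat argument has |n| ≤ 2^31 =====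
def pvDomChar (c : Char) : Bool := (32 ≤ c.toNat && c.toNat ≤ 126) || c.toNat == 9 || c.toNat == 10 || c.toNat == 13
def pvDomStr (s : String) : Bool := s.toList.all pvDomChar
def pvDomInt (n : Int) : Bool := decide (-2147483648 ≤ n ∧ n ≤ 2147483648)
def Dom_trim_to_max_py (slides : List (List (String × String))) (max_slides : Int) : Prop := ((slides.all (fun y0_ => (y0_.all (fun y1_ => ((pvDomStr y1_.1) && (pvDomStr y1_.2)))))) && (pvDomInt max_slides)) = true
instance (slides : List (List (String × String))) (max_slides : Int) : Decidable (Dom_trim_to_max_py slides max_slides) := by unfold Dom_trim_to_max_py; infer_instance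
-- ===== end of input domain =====

-- B replaces A's stable sort over (priority, index) tuples (plus a second sort of the kept
-- indices) by one bucketing pass over the 4 priority levels and a membership-filter pass
-- that rebuilds the kept middle in index order; objective: alternative.

-- ===== PORT A =====
def trim_to_max_py (slides : List (List (String × String))) (max_slides : Int) : List (List (String × String)) :=
  if (slides.length : Int) ≤ max_slides then slides
  else
    let head := PySem.List.slice slides none (some 3)
    -- slides[-1]: none = IndexError, excluded by Pre_ (slides = [] with max_slides < 0)
    let tail := (PySem.List.pyGet? slides (-1)).toList
    let middle := PySem.List.slice slides (some 3) (some (-1))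
    let priority_order : PySem.Dict String Int := ⟨[("content", 0), ("table", 1), ("chart", 2)]⟩
    let middle_sorted := PySem.List.sorted2 (PySem.List.enumerate middle)
      (fun item => priority_order.getD (PySem.Dict.getD ⟨item.2⟩ "type" "content") 3)
      (fun item => item.1)
    let keep_count : Int := max_slides - (head.length : Int) - (tail.length : Int)
    let kept_indices := PySem.List.sorted
      ((PySem.List.slice middle_sorted none (some keep_count)).map (·.1)) (fun i => i)
    -- middle[i]: every kept index originates from enumerate(middle), so none is unreachable
    let kept_middle := kept_indices.filterMap (fun i => PySem.List.pyGet? middle i)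
    head ++ kept_middle ++ tail

-- ===== PORT B =====
def trim_to_max_py_alt (slides : List (List (String × String))) (max_slides : Int) : List (List (String × String)) :=
  if (slides.length : Int) ≤ max_slides then slides
  else
    let head := PySem.List.slice slides none (some 3)
    -- slides[-1]: none = IndexError, excluded by Pre_ (slides = [] with max_slides < 0)
    let tail := (PySem.List.pyGet? slides (-1)).toList
    let middle := PySem.List.slice slides (some 3) (some (-1))
    let priority_order : PySem.Dict String Int := ⟨[("content", 0), ("table", 1), ("chart", 2)]⟩
    -- buckets[pr].append(i): a tuple of 4 lists indexed by the priority value 0..3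
    let buckets := (PySem.List.enumerate middle).foldl
      (fun (b : List Int × List Int × List Int × List Int) p =>
        let pr := priority_order.getD (PySem.Dict.getD ⟨p.2⟩ "type" "content") 3
        if pr == 0 then (b.1 ++ [p.1], b.2.1, b.2.2.1, b.2.2.2)
        else if pr == 1 then (b.1, b.2.1 ++ [p.1], b.2.2.1, b.2.2.2)
        else if pr == 2 then (b.1, b.2.1, b.2.2.1 ++ [p.1], b.2.2.2)
        else (b.1, b.2.1, b.2.2.1, b.2.2.2 ++ [p.1]))
      ([], [], [], [])
    let order := buckets.1 ++ buckets.2.1 ++ buckets.2.2.1 ++ buckets.2.2.2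
    let keep_count : Int := max_slides - (head.length : Int) - (tail.length : Int)
    let kept : PySem.Set Int := PySem.Set.ofList (PySem.List.slice order none (some keep_count))
    head ++ ((PySem.List.enumerate middle).filter (fun p => kept.contains p.1)).map (·.2) ++ tail

-- ===== PRECONDITION & SPEC =====
-- Pre_ excludes only slides = [] with max_slides < 0: there Python A raises IndexError on
-- slides[-1] (B raises the same way).
def Pre_trim_to_max_py (slides : List (List (String × String))) (max_slides : Int) : Prop :=
  slides ≠ [] ∨ 0 ≤ max_slides
instance (slides : List (List (String × String))) (max_slides : Int) : Decidable (Pre_trim_to_max_py slides max_slides) := by unfold Pre_trim_to_max_py; infer_instance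
def pvWitness_trim_to_max_py : (List (List (String × String))) × Int := ([[("type", "chart")], [("type", "content")]], 1)

def Spec_trim_to_max_py (slides : List (List (String × String))) (max_slides : Int) (out : List (List (String × String))) : Prop := out = trim_to_max_py_alt slides max_slides
instance (slides : List (List (String × String))) (max_slides : Int) (out : List (List (String × String))) : Decidable (Spec_trim_to_max_py slides max_slides out) := by unfold Spec_trim_to_max_py; infer_instance

-- ===== CLAIM (what is proved, stated in full; the proofs are below) =====
def Claim_equal_trim_to_max_py : Prop := ∀ (slides : List (List (String × String))) (max_slides : Int), Dom_trim_to_max_py slides max_slides → Pre_trim_to_max_py slides max_slides → Spec_trim_to_max_py slides max_slides (trim_to_max_py slides max_slides)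

-- ===== LEMMAS AND PROOFS =====

def pvPrio (s : List (String × String)) : Int :=
  PySem.Dict.getD (⟨[("content", 0), ("table", 1), ("chart", 2)]⟩ : PySem.Dict String Int)
    (PySem.Dict.getD ⟨s⟩ "type" "content") 3

lemma pvPrio_bounds (s : List (String × String)) : 0 ≤ pvPrio s ∧ pvPrio s ≤ 3 := by
  unfold pvPrio
  generalize PySem.Dict.getD (⟨s⟩ : PySem.Dict String String) "type" "content" = t
  rcases h : PySem.Dict.get? (⟨[("content", 0), ("table", 1), ("chart", 2)]⟩ : PySem.Dict String Int) t with _ | v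
  · simp [PySem.Dict.getD, h]
  · rw [PySem.Dict.getD, h, Option.getD_some]
    rw [PySem.Dict.get?] at h
    rcases Option.map_eq_some_iff.1 h with ⟨x, hx, rfl⟩
    have hv := List.mem_of_find?_eq_some hx
    simp only [List.mem_cons, List.not_mem_nil, or_false] at hv
    rcases hv with rfl | rfl | rfl <;> simp

lemma pv_bucket_fold (l : List (Int × List (String × String)))
    (b0 b1 b2 b3 : List Int) :
    l.foldl
      (fun (b : List Int × List Int × List Int × List Int) p =>
        let pr := pvPrio p.2
        if pr == 0 then (b.1 ++ [p.1], b.2.1, b.2.2.1, b.2.2.2)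
        else if pr == 1 then (b.1, b.2.1 ++ [p.1], b.2.2.1, b.2.2.2)
        else if pr == 2 then (b.1, b.2.1, b.2.2.1 ++ [p.1], b.2.2.2)
        else (b.1, b.2.1, b.2.2.1, b.2.2.2 ++ [p.1]))
      (b0, b1, b2, b3)
    = (b0 ++ (l.filter (fun p => pvPrio p.2 == 0)).map (·.1),
       b1 ++ (l.filter (fun p => pvPrio p.2 == 1)).map (·.1),
       b2 ++ (l.filter (fun p => pvPrio p.2 == 2)).map (·.1),
       b3 ++ (l.filter (fun p => !(pvPrio p.2 == 0) && !(pvPrio p.2 == 1) && !(pvPrio p.2 == 2))).map (·.1)) := by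
  induction l generalizing b0 b1 b2 b3 with
  | nil => simp
  | cons x xs ih =>
    rw [List.foldl_cons]
    cases h0 : pvPrio x.2 == 0 with
    | true =>
      simp only [h0, if_pos]
      rw [ih]
      have e : pvPrio x.2 = 0 := by simpa using h0
      simp [e]
    | false =>
      cases h1 : pvPrio x.2 == 1 with
      | true =>
        simp only [h0, h1, Bool.false_eq_true, if_false, if_true]
        rw [ih]
        have e : pvPrio x.2 = 1 := by simpa using h1
        simp [e]
      | false =>
        cases h2 : pvPrio x.2 == 2 with
        | true =>
          simp only [h0, h1, h2, Bool.false_eq_true, if_false, if_true]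
          rw [ih]
          have e : pvPrio x.2 = 2 := by simpa using h2
          simp [e]
        | false =>
          simp only [h0, h1, h2, Bool.false_eq_true, if_false]
          rw [ih]
          have e0 : ¬ pvPrio x.2 = 0 := by simpa using h0
          have e1 : ¬ pvPrio x.2 = 1 := by simpa using h1
          have e2 : ¬ pvPrio x.2 = 2 := by simpa using h2
          simp [h0, h1, h2]

def pvBucket (m : List (List (String × String))) (i : Int) : List (Int × List (String × String)) :=
  (PySem.List.enumerate m).filter (fun p => pvPrio p.2 == i)

def pvConcat (m : List (List (String × String))) : List (Int × List (String × String)) :=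
  pvBucket m 0 ++ pvBucket m 1 ++ pvBucket m 2 ++ pvBucket m 3

lemma pv_band_absorb (a i j : Int) (hij : i ≠ j) : (a == i && !(a == j)) = (a == i) := by
  cases hb : a == i
  · simp
  · have ha := eq_of_beq hb
    subst ha
    simp [beq_eq_false_iff_ne.2 hij]

lemma pv_band_absorb2 (a i j k : Int) (hij : i ≠ j) (hik : i ≠ k) :
    ((a == i && !(a == j)) && !(a == k)) = (a == i) := by
  cases hb : a == i
  · simp
  · have ha := eq_of_beq hb
    subst ha
    simp [beq_eq_false_iff_ne.2 hij, beq_eq_false_iff_ne.2 hik]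

lemma pv_not3 (a : Int) (h0 : 0 ≤ a) (h3 : a ≤ 3) :
    ((!(a == 2) && !(a == 1)) && !(a == 0)) = (a == 3) := by
  have : a = 0 ∨ a = 1 ∨ a = 2 ∨ a = 3 := by omega
  rcases this with rfl | rfl | rfl | rfl <;> decide

lemma pvConcat_perm (m : List (List (String × String))) :
    (pvConcat m).Perm (PySem.List.enumerate m) := by
  unfold pvConcat pvBucket
  set E := PySem.List.enumerate m with hE
  have h0 : (List.filter (fun p => pvPrio p.2 == 0) E ++ List.filter (fun p => !(pvPrio p.2 == 0)) E).Perm E :=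
    List.filter_append_perm _ E
  set E1 := List.filter (fun p => !(pvPrio p.2 == 0)) E with hE1
  have h1 : (List.filter (fun p => pvPrio p.2 == 1) E1 ++ List.filter (fun p => !(pvPrio p.2 == 1)) E1).Perm E1 :=
    List.filter_append_perm _ E1
  set E2 := List.filter (fun p => !(pvPrio p.2 == 1)) E1 with hE2
  have h2 : (List.filter (fun p => pvPrio p.2 == 2) E2 ++ List.filter (fun p => !(pvPrio p.2 == 2)) E2).Perm E2 :=
    List.filter_append_perm _ E2
  have e1 : List.filter (fun p => pvPrio p.2 == 1) E1 = List.filter (fun p => pvPrio p.2 == 1) E := by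
    rw [hE1, List.filter_filter]
    exact List.filter_congr fun x _ => pv_band_absorb _ 1 0 (by decide)
  have e2 : List.filter (fun p => pvPrio p.2 == 2) E2 = List.filter (fun p => pvPrio p.2 == 2) E := by
    rw [hE2, hE1, List.filter_filter, List.filter_filter]
    exact List.filter_congr fun x _ => pv_band_absorb2 _ 2 1 0 (by decide) (by decide)
  have e3 : List.filter (fun p => !(pvPrio p.2 == 2)) E2 = List.filter (fun p => pvPrio p.2 == 3) E := by
    rw [hE2, hE1, List.filter_filter, List.filter_filter]
    refine List.filter_congr fun x _ => ?_
    have hb := pvPrio_bounds x.2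
    exact pv_not3 _ hb.1 hb.2
  have heq : List.filter (fun p => pvPrio p.2 == 0) E ++ List.filter (fun p => pvPrio p.2 == 1) E ++
        List.filter (fun p => pvPrio p.2 == 2) E ++ List.filter (fun p => pvPrio p.2 == 3) E
      = List.filter (fun p => pvPrio p.2 == 0) E ++ (List.filter (fun p => pvPrio p.2 == 1) E1 ++
        (List.filter (fun p => pvPrio p.2 == 2) E2 ++ List.filter (fun p => !(pvPrio p.2 == 2)) E2)) := by
    rw [e1, e2, e3]
    simp [List.append_assoc]
  rw [heq]
  exact (List.Perm.append_left _ ((List.Perm.append_left _ h2).trans h1)).trans h0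

lemma pv_sorted2_eq_sorted_lex {α : Type} (xs : List α) (k1 k2 : α → Int) :
    PySem.List.sorted2 xs k1 k2 = PySem.List.sorted xs (fun x => toLex (k1 x, k2 x)) := by
  unfold PySem.List.sorted2 PySem.List.sorted
  simp only [if_neg (by decide : ¬ (false = true))]
  congr 1
  funext acc x
  congr 1
  funext a b
  rcases lt_trichotomy (k1 a) (k1 b) with h | h | h <;>
    · simp [Prod.Lex.lt_iff, h, not_lt.2 h.le]
      try omega

lemma pvBucket_prio {m : List (List (String × String))} {i : Int} {p : Int × List (String × String)}
    (hp : p ∈ pvBucket m i) : pvPrio p.2 = i ∧ p ∈ PySem.List.enumerate m := by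
  have := List.mem_filter.1 hp
  exact ⟨by simpa using this.2, this.1⟩

lemma pvBucket_pairwise (m : List (List (String × String))) (i : Int) :
    (pvBucket m i).Pairwise
      (fun a b => (toLex (pvPrio a.2, a.1) : Lex (Int × Int)) < toLex (pvPrio b.2, b.1)) := by
  have hE : (PySem.List.enumerate m).Pairwise (fun p q => p.1 < q.1) :=
    PySem.List.pairwise_lt_enumerate m 0
  have := (hE.filter (fun p => pvPrio p.2 == i))
  refine this.imp_of_mem ?_
  intro a b ha hb hlt
  have ha' := (pvBucket_prio ha).1
  have hb' := (pvBucket_prio hb).1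
  rw [Prod.Lex.lt_iff]
  right
  exact ⟨by simp [ha', hb'], hlt⟩

lemma pv_sorted2_eq_concat (m : List (List (String × String))) :
    PySem.List.sorted2 (PySem.List.enumerate m) (fun p => pvPrio p.2) (fun p => p.1)
      = pvConcat m := by
  rw [pv_sorted2_eq_sorted_lex]
  refine PySem.List.sorted_eq_of_perm_of_pairwise_lt _ _ _ (pvConcat_perm m) ?_
  have cross : ∀ (i j : Int), i < j → ∀ a ∈ pvBucket m i, ∀ b ∈ pvBucket m j,
      (toLex (pvPrio a.2, a.1) : Lex (Int × Int)) < toLex (pvPrio b.2, b.1) := by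
    intro i j hij a ha b hb
    rw [Prod.Lex.lt_iff]
    left
    rw [(pvBucket_prio ha).1, (pvBucket_prio hb).1]
    exact hij
  unfold pvConcat
  rw [List.append_assoc, List.append_assoc]
  rw [List.pairwise_append]
  refine ⟨pvBucket_pairwise m 0, ?_, ?_⟩
  · rw [List.pairwise_append]
    refine ⟨pvBucket_pairwise m 1, ?_, ?_⟩
    · rw [List.pairwise_append]
      refine ⟨pvBucket_pairwise m 2, pvBucket_pairwise m 3, fun a ha b hb => cross 2 3 (by decide) a ha b hb⟩
    · intro a ha b hb
      rcases List.mem_append.1 hb with h | h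
      · exact cross 1 2 (by decide) a ha b h
      · exact cross 1 3 (by decide) a ha b h
  · intro a ha b hb
    rcases List.mem_append.1 hb with h | h
    · exact cross 0 1 (by decide) a ha b h
    rcases List.mem_append.1 h with h' | h'
    · exact cross 0 2 (by decide) a ha b h'
    · exact cross 0 3 (by decide) a ha b h'

lemma pv_slice_map {α β : Type} (f : α → β) (l : List α) (b : Int) :
    PySem.List.slice (l.map f) none (some b) = (PySem.List.slice l none (some b)).map f := by
  simp [PySem.List.slice, List.map_take]

lemma pv_slice_sublist {α : Type} (l : List α) (b : Int) :
    (PySem.List.slice l none (some b)).Sublist l := by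
  simp only [PySem.List.slice]
  exact (List.take_sublist _ _).trans (List.drop_sublist _ _)

lemma pv_kept_eq (m : List (List (String × String))) (k : Int) :
    (PySem.List.sorted
        ((PySem.List.slice (pvConcat m) none (some k)).map (·.1)) (fun i => i)).filterMap
      (fun i => PySem.List.pyGet? m i)
    = ((PySem.List.enumerate m).filter
        (fun p => (PySem.Set.ofList ((PySem.List.slice (pvConcat m) none (some k)).map (·.1))).contains p.1)).map (·.2) := by
  set E := PySem.List.enumerate m with hE
  set T := PySem.List.slice (pvConcat m) none (some k) with hT
  set S := PySem.Set.ofList (T.map (·.1)) with hS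
  set F := E.filter (fun p => S.contains p.1) with hF
  have hperm : (pvConcat m).Perm E := pvConcat_perm m
  -- Nodup facts
  have hEfst : E.map (·.1) = PySem.List.pyRange 0 (m.length : Int) 1 := by
    rw [hE, PySem.List.map_fst_enumerate]; norm_num
  have hEnd : (E.map (·.1)).Nodup := by rw [hEfst]; exact PySem.List.nodup_pyRange_one _ _
  have hMnd : ((pvConcat m).map (·.1)).Nodup := ((hperm.map (·.1)).nodup_iff).2 hEnd
  have hTsub : T.Sublist (pvConcat m) := pv_slice_sublist _ _
  have hTnd : (T.map (·.1)).Nodup := (hTsub.map (·.1)).nodup hMnd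
  have hFsub : F.Sublist E := by rw [hF]; exact List.filter_sublist
  have hFnd : (F.map (·.1)).Nodup := (hFsub.map (·.1)).nodup hEnd
  -- membership
  have hmem : ∀ a : Int, a ∈ F.map (·.1) ↔ a ∈ T.map (·.1) := by
    intro a
    constructor
    · intro ha
      rcases List.mem_map.1 ha with ⟨p, hp, rfl⟩
      have := List.mem_filter.1 hp
      have hc := List.contains_iff_mem.1 this.2
      exact (PySem.Set.mem_ofList _ _).1 hc
    · intro ha
      have haM : a ∈ (pvConcat m).map (·.1) := (hTsub.map (·.1)).subset ha
      have haE : a ∈ E.map (·.1) := (hperm.map (·.1)).subset haM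
      rcases List.mem_map.1 haE with ⟨p, hp, rfl⟩
      refine List.mem_map.2 ⟨p, List.mem_filter.2 ⟨hp, ?_⟩, rfl⟩
      show S.contains p.1 = true
      exact List.contains_iff_mem.2 ((PySem.Set.mem_ofList _ _).2 ha)
  have hFperm : (F.map (·.1)).Perm (T.map (·.1)) :=
    (List.perm_ext_iff_of_nodup hFnd hTnd).2 hmem
  have hFpair : (F.map (·.1)).Pairwise (· < ·) := by
    rw [List.pairwise_map]
    exact (PySem.List.pairwise_lt_enumerate m 0).filter _
  have hsorted : PySem.List.sorted (T.map (·.1)) (fun i => i) = F.map (·.1) :=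
    PySem.List.sorted_eq_of_perm_of_pairwise_lt _ _ _ hFperm hFpair
  rw [hsorted, List.filterMap_map]
  have hget : ∀ p ∈ F, PySem.List.pyGet? m p.1 = some p.2 := by
    intro p hp
    have hpE : p ∈ E := hFsub.mem hp
    rcases (PySem.List.mem_enumerate_iff m 0 p).1 hpE with ⟨j, hj, rfl⟩
    simp [hj]
  calc F.filterMap (fun p => PySem.List.pyGet? m p.1)
      = F.filterMap (fun p => some p.2) := List.filterMap_congr hget
    _ = F.map (·.2) := by simp

lemma pv_not3r (a : Int) (h0 : 0 ≤ a) (h3 : a ≤ 3) :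
    (!(a == 0) && !(a == 1) && !(a == 2)) = (a == 3) := by
  have : a = 0 ∨ a = 1 ∨ a = 2 ∨ a = 3 := by omega
  rcases this with rfl | rfl | rfl | rfl <;> decide

-- the middle part of the two else-branches agree, for any middle list m and keep count k
lemma pv_mid (m : List (List (String × String))) (k : Int) :
    (PySem.List.sorted
        ((PySem.List.slice
            (PySem.List.sorted2 (PySem.List.enumerate m) (fun p => pvPrio p.2) (fun p => p.1))
            none (some k)).map (·.1)) (fun i => i)).filterMap
      (fun i => PySem.List.pyGet? m i)
    = ((PySem.List.enumerate m).filter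
        (fun p =>
          (PySem.Set.ofList (PySem.List.slice
            (((PySem.List.enumerate m).foldl
                (fun (b : List Int × List Int × List Int × List Int) p =>
                  let pr := pvPrio p.2
                  if pr == 0 then (b.1 ++ [p.1], b.2.1, b.2.2.1, b.2.2.2)
                  else if pr == 1 then (b.1, b.2.1 ++ [p.1], b.2.2.1, b.2.2.2)
                  else if pr == 2 then (b.1, b.2.1, b.2.2.1 ++ [p.1], b.2.2.2)
                  else (b.1, b.2.1, b.2.2.1, b.2.2.2 ++ [p.1]))
                ([], [], [], [])).1 ++
              ((PySem.List.enumerate m).foldl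
                (fun (b : List Int × List Int × List Int × List Int) p =>
                  let pr := pvPrio p.2
                  if pr == 0 then (b.1 ++ [p.1], b.2.1, b.2.2.1, b.2.2.2)
                  else if pr == 1 then (b.1, b.2.1 ++ [p.1], b.2.2.1, b.2.2.2)
                  else if pr == 2 then (b.1, b.2.1, b.2.2.1 ++ [p.1], b.2.2.2)
                  else (b.1, b.2.1, b.2.2.1, b.2.2.2 ++ [p.1]))
                ([], [], [], [])).2.1 ++
              ((PySem.List.enumerate m).foldl
                (fun (b : List Int × List Int × List Int × List Int) p =>
                  let pr := pvPrio p.2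
                  if pr == 0 then (b.1 ++ [p.1], b.2.1, b.2.2.1, b.2.2.2)
                  else if pr == 1 then (b.1, b.2.1 ++ [p.1], b.2.2.1, b.2.2.2)
                  else if pr == 2 then (b.1, b.2.1, b.2.2.1 ++ [p.1], b.2.2.2)
                  else (b.1, b.2.1, b.2.2.1, b.2.2.2 ++ [p.1]))
                ([], [], [], [])).2.2.1 ++
              ((PySem.List.enumerate m).foldl
                (fun (b : List Int × List Int × List Int × List Int) p =>
                  let pr := pvPrio p.2
                  if pr == 0 then (b.1 ++ [p.1], b.2.1, b.2.2.1, b.2.2.2)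
                  else if pr == 1 then (b.1, b.2.1 ++ [p.1], b.2.2.1, b.2.2.2)
                  else if pr == 2 then (b.1, b.2.1, b.2.2.1 ++ [p.1], b.2.2.2)
                  else (b.1, b.2.1, b.2.2.1, b.2.2.2 ++ [p.1]))
                ([], [], [], [])).2.2.2)
            none (some k))).contains p.1)).map (·.2) := by
  rw [pv_sorted2_eq_concat, pv_bucket_fold]
  have h3 : List.filter
      (fun p => !(pvPrio p.2 == 0) && !(pvPrio p.2 == 1) && !(pvPrio p.2 == 2))
      (PySem.List.enumerate m)
      = List.filter (fun p => pvPrio p.2 == 3) (PySem.List.enumerate m) := by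
    refine List.filter_congr fun x _ => ?_
    have hb := pvPrio_bounds x.2
    exact pv_not3r _ hb.1 hb.2
  simp only [List.nil_append, h3]
  have horder :
      List.map (fun x : Int × List (String × String) => x.1) (List.filter (fun p => pvPrio p.2 == 0) (PySem.List.enumerate m)) ++
      List.map (fun x : Int × List (String × String) => x.1) (List.filter (fun p => pvPrio p.2 == 1) (PySem.List.enumerate m)) ++
      List.map (fun x : Int × List (String × String) => x.1) (List.filter (fun p => pvPrio p.2 == 2) (PySem.List.enumerate m)) ++
      List.map (fun x : Int × List (String × String) => x.1) (List.filter (fun p => pvPrio p.2 == 3) (PySem.List.enumerate m))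
      = (pvConcat m).map (·.1) := by
    unfold pvConcat pvBucket
    simp [List.map_append, List.append_assoc]
  rw [horder, pv_slice_map]
  exact pv_kept_eq m k

-- ===== VERDICT (by name: the statement is the Claim_ definition above) =====
theorem trim_to_max_py_spec : Claim_equal_trim_to_max_py := by
  intro slides max_slides _ _
  unfold Spec_trim_to_max_py trim_to_max_py trim_to_max_py_alt
  by_cases hle : (slides.length : Int) ≤ max_slides
  · simp only [if_pos hle]
  · simp only [if_neg hle]
    exact congrArg
      (fun X => PySem.List.slice slides none (some 3) ++ X ++ (PySem.List.pyGet? slides (-1)).toList)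
      (pv_mid (PySem.List.slice slides (some 3) (some (-1)))
        (max_slides - ((PySem.List.slice slides none (some 3)).length : Int) -
          (((PySem.List.pyGet? slides (-1)).toList.length : Int))))
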